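-- pv_equiv track=rewrite | github.com/IuliiaUkrainets/BachelorOppgave2021 | server/Komprimering/wavelet111.py | waveletR
-- ===== SOURCE A (Python) =====
-- def waveletR(WLL, WLH, WHL, WHH): # dekomprimering
--     WL = []
--     for i in range(len(WLL[0])):
--         temp = []
--         temp1 = []
--         for j in range(len(WLL)):
--             temp.append(WLL[i][j] + WLH[i][j])
--         for j in range(len(WLL)):
--             temp1.append(WLL[i][j] - WLH[i][j])
--         WL.append(temp)
--         WL.append(temp1)
--
--     WH = []
--
--     for i in range(len(WHL[0])):
--         temp = []
--         temp1 = []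
--         for j in range(len(WHL)):
--             temp.append(WHL[i][j] + WHH[i][j])
--
--         for j in range(len(WHL)):
--             temp1.append(WHL[i][j] - WHH[i][j])
--         WH.append(temp)
--         WH.append(temp1)
--
--     W = [] # resultat matrise
--     for i in range(len(WH)):
--         temp = []
--         for j in range(len(WH[0])):
--             temp.append(WL[i][j] + WH[i][j])
--             temp.append(WL[i][j] - WH[i][j])
--
--         W.append(temp)
--
--
--     return W
-- ===== SOURCE B (Python) =====
-- def waveletR(WLL, WLH, WHL, WHH):  # dekomprimering, single pass without WL/WH intermediates
--     W = []
--     for i in range(len(WHL[0])):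
--         row0 = []
--         row1 = []
--         for j in range(len(WHL)):
--             a = WLL[i][j] + WLH[i][j]
--             b = WLL[i][j] - WLH[i][j]
--             c = WHL[i][j] + WHH[i][j]
--             d = WHL[i][j] - WHH[i][j]
--             row0.append(a + c)
--             row0.append(a - c)
--             row1.append(b + d)
--             row1.append(b - d)
--         W.append(row0)
--         W.append(row1)
--     return W
-- ===== Notes on version B (the rewrite author's own statement) =====
-- stated objective: alternative
-- what changed: B fuses A's three passes (build WL, build WH, combine) into a single double loop over the subbands that emits each 2x2 output block directly, never materialising the intermediate WL/WH matrices.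
import Mathlib
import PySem

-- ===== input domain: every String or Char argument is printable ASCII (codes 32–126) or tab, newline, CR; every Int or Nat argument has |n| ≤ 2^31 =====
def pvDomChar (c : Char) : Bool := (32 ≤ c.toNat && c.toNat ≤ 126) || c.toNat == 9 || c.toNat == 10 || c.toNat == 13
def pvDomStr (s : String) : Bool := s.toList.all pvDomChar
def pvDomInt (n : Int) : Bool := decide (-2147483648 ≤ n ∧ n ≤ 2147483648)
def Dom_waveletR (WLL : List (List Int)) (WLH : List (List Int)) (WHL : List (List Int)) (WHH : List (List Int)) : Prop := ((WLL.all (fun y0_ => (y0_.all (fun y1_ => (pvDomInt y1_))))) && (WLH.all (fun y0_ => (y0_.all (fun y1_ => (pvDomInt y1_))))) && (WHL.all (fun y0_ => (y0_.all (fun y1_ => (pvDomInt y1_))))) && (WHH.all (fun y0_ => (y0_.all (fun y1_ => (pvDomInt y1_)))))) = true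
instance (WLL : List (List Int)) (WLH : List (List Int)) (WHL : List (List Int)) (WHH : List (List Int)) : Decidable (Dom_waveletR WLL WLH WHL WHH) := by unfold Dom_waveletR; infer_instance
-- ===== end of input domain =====

-- B fuses the three passes of A into one loop over the subbands, emitting each 2×2 output
-- block directly without building the intermediate WL/WH matrices (objective: alternative).

-- M[i][j] with nonnegative Nat indices, 0 on out-of-range (used only where Pre_ keeps indices in range)
def pvIdx (M : List (List Int)) (i j : Nat) : Int :=
  (PySem.List.pyGet? ((PySem.List.pyGet? M (i : Int)).getD []) (j : Int)).getD 0

-- ===== PORT A =====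
def waveletR (WLL : List (List Int)) (WLH : List (List Int)) (WHL : List (List Int)) (WHH : List (List Int)) : List (List Int) :=
  let WL := (List.range ((PySem.List.pyGet? WLL 0).getD []).length).foldl
    (fun WL i =>
      let temp := (List.range WLL.length).foldl
        (fun t j => t ++ [pvIdx WLL i j + pvIdx WLH i j]) []
      let temp1 := (List.range WLL.length).foldl
        (fun t j => t ++ [pvIdx WLL i j - pvIdx WLH i j]) []
      (WL ++ [temp]) ++ [temp1]) []
  let WH := (List.range ((PySem.List.pyGet? WHL 0).getD []).length).foldl
    (fun WH i =>
      let temp := (List.range WHL.length).foldl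
        (fun t j => t ++ [pvIdx WHL i j + pvIdx WHH i j]) []
      let temp1 := (List.range WHL.length).foldl
        (fun t j => t ++ [pvIdx WHL i j - pvIdx WHH i j]) []
      (WH ++ [temp]) ++ [temp1]) []
  (List.range WH.length).foldl
    (fun W i =>
      let temp := (List.range ((PySem.List.pyGet? WH 0).getD []).length).foldl
        (fun t j => (t ++ [pvIdx WL i j + pvIdx WH i j]) ++ [pvIdx WL i j - pvIdx WH i j]) []
      W ++ [temp]) []

-- ===== PORT B =====
def waveletR_alt (WLL : List (List Int)) (WLH : List (List Int)) (WHL : List (List Int)) (WHH : List (List Int)) : List (List Int) :=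
  (List.range ((PySem.List.pyGet? WHL 0).getD []).length).foldl
    (fun W i =>
      let rows := (List.range WHL.length).foldl
        (fun (rr : List Int × List Int) j =>
          let a := pvIdx WLL i j + pvIdx WLH i j
          let b := pvIdx WLL i j - pvIdx WLH i j
          let c := pvIdx WHL i j + pvIdx WHH i j
          let d := pvIdx WHL i j - pvIdx WHH i j
          ((rr.1 ++ [a + c]) ++ [a - c], (rr.2 ++ [b + d]) ++ [b - d])) ([], [])
      (W ++ [rows.1]) ++ [rows.2]) []

-- ===== PRECONDITION & SPEC =====
-- Pre_ = exactly the inputs where Python A returns (no IndexError): both leading subbands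
-- nonempty, every row A indexes long enough, and the low/high shapes compatible for the final pass.
def Pre_waveletR (WLL : List (List Int)) (WLH : List (List Int)) (WHL : List (List Int)) (WHH : List (List Int)) : Prop :=
  WLL ≠ [] ∧ WHL ≠ [] ∧
  WLL.headI.length ≤ WLL.length ∧ WLL.headI.length ≤ WLH.length ∧
  (∀ r ∈ WLL.take WLL.headI.length, WLL.length ≤ r.length) ∧
  (∀ r ∈ WLH.take WLL.headI.length, WLL.length ≤ r.length) ∧
  WHL.headI.length ≤ WHL.length ∧ WHL.headI.length ≤ WHH.length ∧
  (∀ r ∈ WHL.take WHL.headI.length, WHL.length ≤ r.length) ∧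
  (∀ r ∈ WHH.take WHL.headI.length, WHL.length ≤ r.length) ∧
  (0 < WHL.headI.length → WHL.headI.length ≤ WLL.headI.length ∧
    (0 < WHL.length → WHL.length ≤ WLL.length))
instance (WLL : List (List Int)) (WLH : List (List Int)) (WHL : List (List Int)) (WHH : List (List Int)) : Decidable (Pre_waveletR WLL WLH WHL WHH) := by unfold Pre_waveletR; infer_instance

def pvWitness_waveletR : List (List Int) × List (List Int) × List (List Int) × List (List Int) :=
  ([[1]], [[1]], [[1]], [[1]])

def Spec_waveletR (WLL : List (List Int)) (WLH : List (List Int)) (WHL : List (List Int)) (WHH : List (List Int)) (out : List (List Int)) : Prop := out = waveletR_alt WLL WLH WHL WHH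
instance (WLL : List (List Int)) (WLH : List (List Int)) (WHL : List (List Int)) (WHH : List (List Int)) (out : List (List Int)) : Decidable (Spec_waveletR WLL WLH WHL WHH out) := by unfold Spec_waveletR; infer_instance

-- ===== CLAIM (what is proved, stated in full; the proofs are below) =====
def Claim_equal_waveletR : Prop := ∀ (WLL : List (List Int)) (WLH : List (List Int)) (WHL : List (List Int)) (WHH : List (List Int)), Dom_waveletR WLL WLH WHL WHH → Pre_waveletR WLL WLH WHL WHH → Spec_waveletR WLL WLH WHL WHH (waveletR WLL WLH WHL WHH)

-- ===== LEMMAS AND PROOFS =====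

-- a loop appending two elements per step builds the flatMap of pairs
theorem foldl_append_two {α β : Type} (l : List α) (f g : α → List β) (init : List β) :
    l.foldl (fun s x => (s ++ f x) ++ g x) init = init ++ l.flatMap (fun x => f x ++ g x) := by
  induction l generalizing init with
  | nil => simp
  | cons a t ih => rw [List.foldl_cons, ih]; simp [List.append_assoc]

theorem foldl_pair_append {α β : Type} (l : List α) (f g h k : α → β) (init : List β × List β) :
    l.foldl (fun rr x => ((rr.1 ++ [f x]) ++ [g x], (rr.2 ++ [h x]) ++ [k x])) init
      = (init.1 ++ l.flatMap (fun x => [f x, g x]), init.2 ++ l.flatMap (fun x => [h x, k x])) := by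
  induction l generalizing init with
  | nil => simp
  | cons a t ih => rw [List.foldl_cons, ih]; simp [List.append_assoc]

theorem pairs_length {β : Type} (c : Nat) (f g : Nat → β) :
    ((List.range c).flatMap (fun i => [f i, g i])).length = 2 * c := by
  induction c with
  | zero => simp
  | succ n ih => simp [List.range_succ, ih]; omega

theorem pairs_getElem?_even {β : Type} (c k : Nat) (f g : Nat → β) (hk : k < c) :
    ((List.range c).flatMap (fun i => [f i, g i]))[2 * k]? = some (f k) := by
  induction c with
  | zero => omega
  | succ n ih =>
    rw [List.range_succ, List.flatMap_append]
    rcases Nat.lt_or_ge k n with h | h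
    · rw [List.getElem?_append_left (by rw [pairs_length]; omega), ih h]
    · have hkn : k = n := by omega
      rw [List.getElem?_append_right (by rw [pairs_length]; omega), pairs_length, hkn]
      have h0 : 2 * n - 2 * n = 0 := by omega
      rw [h0]; rfl
theorem pairs_getElem?_odd {β : Type} (c k : Nat) (f g : Nat → β) (hk : k < c) :
    ((List.range c).flatMap (fun i => [f i, g i]))[2 * k + 1]? = some (g k) := by
  induction c with
  | zero => omega
  | succ n ih =>
    rw [List.range_succ, List.flatMap_append]
    rcases Nat.lt_or_ge k n with h | h
    · rw [List.getElem?_append_left (by rw [pairs_length]; omega), ih h]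
    · have hkn : k = n := by omega
      rw [List.getElem?_append_right (by rw [pairs_length]; omega), pairs_length, hkn]
      have h1 : 2 * n + 1 - 2 * n = 1 := by omega
      rw [h1]; rfl

theorem map_range_two {β : Type} (c : Nat) (f : Nat → β) :
    (List.range (2 * c)).map f = (List.range c).flatMap (fun k => [f (2 * k), f (2 * k + 1)]) := by
  induction c with
  | zero => simp
  | succ n ih =>
    have h2 : 2 * (n + 1) = (2 * n + 1) + 1 := by omega
    rw [h2, List.range_succ, List.range_succ, List.map_append, List.map_append,
      List.range_succ (n := n), List.flatMap_append, ih]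
    simp

theorem pvIdx_eq (M : List (List Int)) (i j : Nat) :
    pvIdx M i j = ((M[i]?.getD [])[j]?.getD 0) := by
  simp [pvIdx, PySem.List.pyGet?_natCast]


-- rows and interleaved matrices that A's first two passes build
def rowP (X Y : List (List Int)) (i : Nat) : List Int :=
  (List.range X.length).map fun j => pvIdx X i j + pvIdx Y i j
def rowM (X Y : List (List Int)) (i : Nat) : List Int :=
  (List.range X.length).map fun j => pvIdx X i j - pvIdx Y i j
def pairsM (X Y : List (List Int)) (c : Nat) : List (List Int) :=
  (List.range c).flatMap fun i => [rowP X Y i, rowM X Y i]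

theorem pairsM_length (X Y : List (List Int)) (c : Nat) : (pairsM X Y c).length = 2 * c :=
  pairs_length c _ _

theorem rowP_length (X Y : List (List Int)) (i : Nat) : (rowP X Y i).length = X.length := by
  simp [rowP]

theorem pyGet0_pairsM (X Y : List (List Int)) (c : Nat) (hc : 0 < c) :
    (PySem.List.pyGet? (pairsM X Y c) (0 : Int)).getD [] = rowP X Y 0 := by
  have h := pairs_getElem?_even c 0 (rowP X Y) (rowM X Y) hc
  rw [show ((0 : Int)) = ((0 : Nat) : Int) by simp, PySem.List.pyGet?_natCast]
  rw [Nat.mul_zero] at h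
  unfold pairsM
  rw [h]
  rfl

theorem pvIdx_pairsM_even (X Y : List (List Int)) (c k j : Nat) (hk : k < c) :
    pvIdx (pairsM X Y c) (2 * k) j = ((rowP X Y k)[j]?.getD 0) := by
  rw [pvIdx_eq]
  unfold pairsM
  rw [pairs_getElem?_even c k _ _ hk]
  rfl

theorem pvIdx_pairsM_odd (X Y : List (List Int)) (c k j : Nat) (hk : k < c) :
    pvIdx (pairsM X Y c) (2 * k + 1) j = ((rowM X Y k)[j]?.getD 0) := by
  rw [pvIdx_eq]
  unfold pairsM
  rw [pairs_getElem?_odd c k _ _ hk]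
  rfl

theorem rowP_getD (X Y : List (List Int)) (k j : Nat) (hj : j < X.length) :
    ((rowP X Y k)[j]?.getD 0) = pvIdx X k j + pvIdx Y k j := by
  simp [rowP, hj]

theorem rowM_getD (X Y : List (List Int)) (k j : Nat) (hj : j < X.length) :
    ((rowM X Y k)[j]?.getD 0) = pvIdx X k j - pvIdx Y k j := by
  simp [rowM, hj]

-- ===== VERDICT (by name: the statement is the Claim_ definition above) =====
theorem waveletR_spec : Claim_equal_waveletR := by
  intro WLL WLH WHL WHH _ hpre
  obtain ⟨hL, hH, h1a, h1b, h1c, h1d, h2a, h2b, h2c, h2d, h3⟩ := hpre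
  show waveletR WLL WLH WHL WHH = waveletR_alt WLL WLH WHL WHH
  have hheadL : (PySem.List.pyGet? WLL (0:Int)).getD [] = WLL.headI := by
    cases WLL with
    | nil => exact absurd rfl hL
    | cons a t => simp [PySem.List.pyGet?, PySem.List.pyIdx?]
  have hheadH : (PySem.List.pyGet? WHL (0:Int)).getD [] = WHL.headI := by
    cases WHL with
    | nil => exact absurd rfl hH
    | cons a t => simp [PySem.List.pyGet?, PySem.List.pyIdx?]
  simp only [waveletR, waveletR_alt, hheadL, hheadH, foldl_pair_append, foldl_append_two,
    PySem.List.foldl_append_singleton_eq_map, List.nil_append]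
  show (List.range (pairsM WHL WHH WHL.headI.length).length).map (fun i =>
      (List.range ((PySem.List.pyGet? (pairsM WHL WHH WHL.headI.length) (0 : Int)).getD []).length).flatMap (fun j =>
        [pvIdx (pairsM WLL WLH WLL.headI.length) i j + pvIdx (pairsM WHL WHH WHL.headI.length) i j,
         pvIdx (pairsM WLL WLH WLL.headI.length) i j - pvIdx (pairsM WHL WHH WHL.headI.length) i j]))
    = (List.range WHL.headI.length).flatMap (fun i =>
        [(List.range WHL.length).flatMap (fun j =>
            [(pvIdx WLL i j + pvIdx WLH i j) + (pvIdx WHL i j + pvIdx WHH i j),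
             (pvIdx WLL i j + pvIdx WLH i j) - (pvIdx WHL i j + pvIdx WHH i j)]),
         (List.range WHL.length).flatMap (fun j =>
            [(pvIdx WLL i j - pvIdx WLH i j) + (pvIdx WHL i j - pvIdx WHH i j),
             (pvIdx WLL i j - pvIdx WLH i j) - (pvIdx WHL i j - pvIdx WHH i j)])])
  rw [pairsM_length, map_range_two]
  apply List.flatMap_congr
  intro k hk
  rw [List.mem_range] at hk
  obtain ⟨hc2c1, hn2n1⟩ := h3 (by omega)
  have hkc1 : k < WLL.headI.length := lt_of_lt_of_le hk hc2c1
  rw [pyGet0_pairsM WHL WHH _ (by omega), rowP_length]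
  congr 1
  · apply List.flatMap_congr
    intro j hj
    rw [List.mem_range] at hj
    have hjn1 : j < WLL.length := lt_of_lt_of_le hj (hn2n1 (by omega))
    rw [pvIdx_pairsM_even WLL WLH _ k j hkc1, pvIdx_pairsM_even WHL WHH _ k j hk,
      rowP_getD WLL WLH k j hjn1, rowP_getD WHL WHH k j hj]
  congr 1
  apply List.flatMap_congr
  intro j hj
  rw [List.mem_range] at hj
  have hjn1 : j < WLL.length := lt_of_lt_of_le hj (hn2n1 (by omega))
  rw [pvIdx_pairsM_odd WLL WLH _ k j hkc1, pvIdx_pairsM_odd WHL WHH _ k j hk,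
    rowM_getD WLL WLH k j hjn1, rowM_getD WHL WHH k j hj]
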